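-- pv_equiv track=rewrite | github.com/sprzesmycki/telegram-bot | bot/modules/piano/handlers/piano.py | _strip_subcommand
-- ===== SOURCE A (Python) =====
-- def _strip_subcommand(text: str, subcommand_tokens: int) -> str:
--     """Strip ``/piano <sub1> [<sub2>...]`` from *text* and return remainder."""
--     remainder = text
--     for _ in range(subcommand_tokens):
--         remainder = remainder.strip()
--         if not remainder:
--             break
--         parts = remainder.split(maxsplit=1)
--         remainder = parts[1] if len(parts) == 2 else ""
--     return remainder.strip()
-- ===== SOURCE B (Python) =====
-- def _strip_subcommand(text: str, subcommand_tokens: int) -> str: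
--     """Strip ``/piano <sub1> [<sub2>...]`` from *text* and return remainder."""
--     n = max(subcommand_tokens, 0)
--     parts = text.split(maxsplit=n)
--     return parts[n].strip() if len(parts) > n else ""
-- ===== Notes on version B (the rewrite author's own statement) =====
-- stated objective: simpler
-- what changed: Replaces A's per-token strip/split(maxsplit=1) loop with a single text.split(maxsplit=n) call and one index, so the token-stripping loop disappears.
import Mathlib
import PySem

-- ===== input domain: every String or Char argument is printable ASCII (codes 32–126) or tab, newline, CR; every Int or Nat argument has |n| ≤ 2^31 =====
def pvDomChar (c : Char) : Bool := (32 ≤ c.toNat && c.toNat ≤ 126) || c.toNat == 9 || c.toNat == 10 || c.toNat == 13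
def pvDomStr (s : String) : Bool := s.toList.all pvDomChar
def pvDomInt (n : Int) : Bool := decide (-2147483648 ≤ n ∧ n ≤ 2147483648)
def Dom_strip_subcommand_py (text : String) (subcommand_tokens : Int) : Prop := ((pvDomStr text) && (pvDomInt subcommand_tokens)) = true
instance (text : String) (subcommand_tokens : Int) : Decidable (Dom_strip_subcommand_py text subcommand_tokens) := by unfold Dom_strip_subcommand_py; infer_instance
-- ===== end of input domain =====

-- B replaces A's per-token strip/split(maxsplit=1) loop by a single split(maxsplit=n) and one index (simpler).

-- ===== PORT A =====
-- the `for _ in range(subcommand_tokens)` loop of A on the remainder (char level);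
-- `break` on an empty stripped remainder returns it (nothing after the break runs)
def pvLoopA : Nat → List Char → List Char
  | 0, rem => rem
  | Nat.succ k, rem =>
      let r := PySem.Chars.strip rem
      if r = [] then r
      else
        let parts := PySem.Chars.split₀Max r 1
        pvLoopA k (if parts.length = 2 then parts[1]! else [])

def strip_subcommand_py (text : String) (subcommand_tokens : Int) : String :=
  String.ofList (PySem.Chars.strip (pvLoopA subcommand_tokens.toNat text.toList))

-- ===== PORT B =====
def strip_subcommand_py_alt (text : String) (subcommand_tokens : Int) : String :=
  let n : Int := max subcommand_tokens 0
  let parts := PySem.Str.split₀Max text n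
  if n < (parts.length : Int) then PySem.Str.strip parts[n.toNat]! else ""

-- ===== PRECONDITION & SPEC =====
def Spec_strip_subcommand_py (text : String) (subcommand_tokens : Int) (out : String) : Prop := out = strip_subcommand_py_alt text subcommand_tokens
instance (text : String) (subcommand_tokens : Int) (out : String) : Decidable (Spec_strip_subcommand_py text subcommand_tokens out) := by unfold Spec_strip_subcommand_py; infer_instance

-- ===== CLAIM (what is proved, stated in full; the proofs are below) =====
def Claim_equal_strip_subcommand_py : Prop := ∀ (text : String) (subcommand_tokens : Int), Dom_strip_subcommand_py text subcommand_tokens → Spec_strip_subcommand_py text subcommand_tokens (strip_subcommand_py text subcommand_tokens)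

-- ===== LEMMAS AND PROOFS =====

theorem pvLstrip_idem (cs : List Char) :
    PySem.Chars.lstrip (PySem.Chars.lstrip cs) = PySem.Chars.lstrip cs := by
  unfold PySem.Chars.lstrip
  induction cs with
  | nil => simp
  | cons c cs ih => by_cases h : PySem.Chars.isspace c <;> simp [h, ih]

theorem pvLstrip_eq_nil_iff (cs : List Char) :
    PySem.Chars.lstrip cs = [] ↔ ∀ c ∈ cs, PySem.Chars.isspace c = true := by
  simp [PySem.Chars.lstrip, List.dropWhile_eq_nil_iff]

theorem pvRstrip_eq_nil_iff (cs : List Char) :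
    PySem.Chars.rstrip cs = [] ↔ ∀ c ∈ cs, PySem.Chars.isspace c = true := by
  simp [PySem.Chars.rstrip, List.dropWhile_eq_nil_iff]

theorem pvRstrip_cons (c : Char) (cs : List Char) :
    PySem.Chars.rstrip (c :: cs) =
      if PySem.Chars.rstrip cs = [] then (if PySem.Chars.isspace c then [] else [c])
      else c :: PySem.Chars.rstrip cs := by
  simp only [PySem.Chars.rstrip, List.reverse_cons, List.dropWhile_append, List.reverse_eq_nil_iff]
  by_cases h : List.dropWhile PySem.Chars.isspace cs.reverse = [] <;>
    by_cases hc : PySem.Chars.isspace c <;>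
    simp [h, hc, List.dropWhile_cons]

theorem pvComm (cs : List Char) :
    PySem.Chars.lstrip (PySem.Chars.rstrip cs) = PySem.Chars.rstrip (PySem.Chars.lstrip cs) := by
  induction cs with
  | nil => simp [PySem.Chars.lstrip, PySem.Chars.rstrip]
  | cons c cs ih =>
    by_cases hc : PySem.Chars.isspace c
    · by_cases h : PySem.Chars.rstrip cs = []
      · have h1 : PySem.Chars.rstrip (c :: cs) = [] := by
          rw [pvRstrip_cons]; simp [h, hc]
        have h2 : PySem.Chars.lstrip cs = [] :=
          (pvLstrip_eq_nil_iff cs).2 ((pvRstrip_eq_nil_iff cs).1 h)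
        have hl : PySem.Chars.lstrip (c :: cs) = PySem.Chars.lstrip cs := by
          simp [PySem.Chars.lstrip, List.dropWhile_cons, hc]
        rw [h1, hl, h2]
        simp [PySem.Chars.lstrip, PySem.Chars.rstrip]
      · have hl : PySem.Chars.lstrip (c :: cs) = PySem.Chars.lstrip cs := by
          simp [PySem.Chars.lstrip, List.dropWhile_cons, hc]
        rw [pvRstrip_cons, hl, ← ih]
        simp [h, PySem.Chars.lstrip, List.dropWhile_cons, hc]
    · have hl : PySem.Chars.lstrip (c :: cs) = c :: cs := by
        simp [PySem.Chars.lstrip, List.dropWhile_cons, hc]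
      rw [hl, pvRstrip_cons]
      by_cases h : PySem.Chars.rstrip cs = [] <;>
        simp [h, hc, PySem.Chars.lstrip, List.dropWhile_cons]

theorem pvStrip_eq_nil_iff (cs : List Char) :
    PySem.Chars.strip cs = [] ↔ PySem.Chars.lstrip cs = [] := by
  rw [PySem.Chars.strip, pvRstrip_eq_nil_iff]
  constructor
  · intro h
    by_contra hne
    have hmem : (PySem.Chars.lstrip cs).head hne ∈ PySem.Chars.lstrip cs := List.head_mem hne
    have := h _ hmem
    unfold PySem.Chars.lstrip at hne hmem this
    rw [List.head_dropWhile_not PySem.Chars.isspace] at this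
    simp at this
  · intro h; rw [h]; simp

theorem pvLstrip_strip (cs : List Char) :
    PySem.Chars.lstrip (PySem.Chars.strip cs) = PySem.Chars.strip cs := by
  rw [PySem.Chars.strip, pvComm, pvLstrip_idem]


theorem pvGo_zero (m : Nat) (l : List Char) (acc : List (List Char)) :
    PySem.Chars.split₀Max.go 0 m l acc = acc.reverse := by
  simp [PySem.Chars.split₀Max.go]

theorem pvGo_succ_nil (fuel m : Nat) (l : List Char) (acc : List (List Char))
    (hd : List.dropWhile PySem.Chars.isspace l = []) :
    PySem.Chars.split₀Max.go (fuel+1) m l acc = acc.reverse := by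
  simp [PySem.Chars.split₀Max.go, hd]

theorem pvGo_succ_zero (fuel : Nat) (l : List Char) (acc : List (List Char))
    (hd : List.dropWhile PySem.Chars.isspace l ≠ []) :
    PySem.Chars.split₀Max.go (fuel+1) 0 l acc =
      (List.dropWhile PySem.Chars.isspace l :: acc).reverse := by
  rw [PySem.Chars.split₀Max.go]
  cases h : List.dropWhile PySem.Chars.isspace l with
  | nil => exact absurd h hd
  | cons a t => simp

theorem pvGo_succ_pos (fuel m : Nat) (l : List Char) (acc : List (List Char))
    (hd : List.dropWhile PySem.Chars.isspace l ≠ []) (hm : m ≠ 0) :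
    PySem.Chars.split₀Max.go (fuel+1) m l acc =
      PySem.Chars.split₀Max.go fuel (m-1)
        (List.dropWhile (fun c => !PySem.Chars.isspace c) (List.dropWhile PySem.Chars.isspace l))
        (List.takeWhile (fun c => !PySem.Chars.isspace c) (List.dropWhile PySem.Chars.isspace l) :: acc) := by
  rw [PySem.Chars.split₀Max.go]
  cases h : List.dropWhile PySem.Chars.isspace l with
  | nil => exact absurd h hd
  | cons a t => simp [hm]

theorem pvStep_length (l : List Char) (hd : List.dropWhile PySem.Chars.isspace l ≠ []) :
    (List.dropWhile (fun c => !PySem.Chars.isspace c) (List.dropWhile PySem.Chars.isspace l)).length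
      < l.length := by
  set l' := List.dropWhile PySem.Chars.isspace l with hl'
  cases h : l' with
  | nil => exact absurd h hd
  | cons a t =>
    have ha : PySem.Chars.isspace a = false := by
      have := List.head_dropWhile_not PySem.Chars.isspace (l := l) (by rw [← hl', h]; simp)
      simpa [← hl', h] using this
    have h2 : l'.length ≤ l.length := List.length_dropWhile_le _ _
    have h4 := List.length_dropWhile_le (fun c => !PySem.Chars.isspace c) t
    have h3 : t.length < l'.length := by rw [h]; simp
    simp only [List.dropWhile_cons, ha]
    simp only [Bool.not_false, if_pos]
    omega

theorem pvGo_fuel (fuel fuel' m : Nat) (l : List Char) (acc : List (List Char))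
    (h : l.length < fuel) (h' : l.length < fuel') :
    PySem.Chars.split₀Max.go fuel m l acc = PySem.Chars.split₀Max.go fuel' m l acc := by
  induction fuel generalizing fuel' m l acc with
  | zero => omega
  | succ fuel ih =>
    cases fuel' with
    | zero => omega
    | succ f' =>
      by_cases hd : List.dropWhile PySem.Chars.isspace l = []
      · rw [pvGo_succ_nil _ _ _ _ hd, pvGo_succ_nil _ _ _ _ hd]
      · by_cases hm : m = 0
        · subst hm; rw [pvGo_succ_zero _ _ _ hd, pvGo_succ_zero _ _ _ hd]
        · rw [pvGo_succ_pos _ _ _ _ hd hm, pvGo_succ_pos _ _ _ _ hd hm]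
          have := pvStep_length l hd
          exact ih _ _ _ _ (by omega) (by omega)

theorem pvGo_acc (fuel m : Nat) (l : List Char) (acc : List (List Char)) :
    PySem.Chars.split₀Max.go fuel m l acc = acc.reverse ++ PySem.Chars.split₀Max.go fuel m l [] := by
  induction fuel generalizing m l acc with
  | zero => simp [pvGo_zero]
  | succ fuel ih =>
    by_cases hd : List.dropWhile PySem.Chars.isspace l = []
    · simp [pvGo_succ_nil _ _ _ _ hd]
    · by_cases hm : m = 0
      · subst hm; simp [pvGo_succ_zero _ _ _ hd]
      · rw [pvGo_succ_pos _ _ _ _ hd hm, pvGo_succ_pos _ _ _ _ hd hm,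
           ih, ih _ _ (List.takeWhile _ _ :: [])]
        simp

theorem pvSplitMax_eq_go (cs : List Char) (n : Nat) :
    PySem.Chars.split₀Max cs (n : Int) = PySem.Chars.split₀Max.go (cs.length + 1) n cs [] := by
  rw [PySem.Chars.split₀Max]
  simp

theorem pvSplitMax_nil (cs : List Char) (n : Nat) (h : PySem.Chars.lstrip cs = []) :
    PySem.Chars.split₀Max cs (n : Int) = [] := by
  rw [pvSplitMax_eq_go, pvGo_succ_nil _ _ _ _ h]
  rfl

theorem pvSplitMax_zero (cs : List Char) :
    PySem.Chars.split₀Max cs (0 : Int) =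
      if PySem.Chars.lstrip cs = [] then [] else [PySem.Chars.lstrip cs] := by
  have h0 : ((0 : Nat) : Int) = (0 : Int) := rfl
  rw [← h0, pvSplitMax_eq_go]
  by_cases h : PySem.Chars.lstrip cs = []
  · rw [pvGo_succ_nil _ _ _ _ h, if_pos h]; rfl
  · rw [pvGo_succ_zero _ _ _ h, if_neg h]; rfl

theorem pvSplitMax_lstrip (cs : List Char) (n : Nat) :
    PySem.Chars.split₀Max (PySem.Chars.lstrip cs) (n : Int) = PySem.Chars.split₀Max cs (n : Int) := by
  rw [pvSplitMax_eq_go, pvSplitMax_eq_go]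
  have hid : List.dropWhile PySem.Chars.isspace (PySem.Chars.lstrip cs)
      = List.dropWhile PySem.Chars.isspace cs := pvLstrip_idem cs
  by_cases hd : List.dropWhile PySem.Chars.isspace cs = []
  · rw [pvGo_succ_nil _ _ _ _ (hid.trans hd), pvGo_succ_nil _ _ _ _ hd]
  · by_cases hn : n = 0
    · subst hn
      rw [pvGo_succ_zero _ _ _ (fun hc => hd (hid ▸ hc)), pvGo_succ_zero _ _ _ hd, hid]
    · rw [pvGo_succ_pos _ _ _ _ (fun hc => hd (hid ▸ hc)) hn, pvGo_succ_pos _ _ _ _ hd hn, hid]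
      have h1 := pvStep_length cs hd
      have h2 := pvStep_length (PySem.Chars.lstrip cs) (fun hc => hd (hid ▸ hc))
      rw [hid] at h2
      exact pvGo_fuel _ _ _ _ _ (by omega) (by omega)

theorem pvSplitMax_succ (cs : List Char) (n : Nat) (h : PySem.Chars.lstrip cs ≠ []) :
    PySem.Chars.split₀Max cs ((n : Int) + 1) =
      (PySem.Chars.lstrip cs).takeWhile (fun c => !PySem.Chars.isspace c) ::
        PySem.Chars.split₀Max ((PySem.Chars.lstrip cs).dropWhile (fun c => !PySem.Chars.isspace c)) (n : Int) := by
  have hcast : ((n : Int) + 1) = ((n + 1 : Nat) : Int) := by push_cast; ring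
  rw [hcast, pvSplitMax_eq_go, pvGo_succ_pos _ _ _ _ h (by omega), pvGo_acc]
  have h1 := pvStep_length cs h
  rw [pvSplitMax_eq_go]
  have : n + 1 - 1 = n := by omega
  rw [this, pvGo_fuel cs.length _ n _ _ (by omega)
        (Nat.lt_succ_of_le (le_refl _))]
  rfl

theorem pvDW_idem (p : Char → Bool) (l : List Char) :
    List.dropWhile p (List.dropWhile p l) = List.dropWhile p l := by
  induction l with
  | nil => simp
  | cons c cs ih => by_cases h : p c <;> simp [h, ih]

theorem pvRstrip_idem (cs : List Char) :
    PySem.Chars.rstrip (PySem.Chars.rstrip cs) = PySem.Chars.rstrip cs := by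
  simp [PySem.Chars.rstrip, pvDW_idem]

theorem pvRstrip_decomp (l : List Char) :
    PySem.Chars.rstrip l =
      l.takeWhile (fun c => !PySem.Chars.isspace c) ++
        PySem.Chars.rstrip (l.dropWhile (fun c => !PySem.Chars.isspace c)) := by
  conv_lhs => rw [← List.takeWhile_append_dropWhile (p := fun c => !PySem.Chars.isspace c) (l := l)]
  rw [PySem.Chars.rstrip, List.reverse_append, List.dropWhile_append]
  have hw : ∀ c ∈ (l.takeWhile (fun c => !PySem.Chars.isspace c)).reverse,
      PySem.Chars.isspace c = false := by
    intro c hc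
    rw [List.mem_reverse] at hc
    have := List.mem_takeWhile_imp hc
    simpa using this
  by_cases h : List.dropWhile PySem.Chars.isspace (l.dropWhile (fun c => !PySem.Chars.isspace c)).reverse = []
  · rw [h]
    simp only [List.isEmpty_nil, if_pos]
    rw [List.dropWhile_eq_self_iff.mpr ?_]
    · simp [PySem.Chars.rstrip, h]
    · intro hne
      simp only [Bool.not_eq_true]
      exact hw _ (List.getElem_mem hne)
  · rw [if_neg (by simpa using h)]
    simp [PySem.Chars.rstrip]

theorem pvDrop_rstrip_drop (l : List Char) :
    List.dropWhile (fun c => !PySem.Chars.isspace c)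
        (PySem.Chars.rstrip (List.dropWhile (fun c => !PySem.Chars.isspace c) l)) =
      PySem.Chars.rstrip (List.dropWhile (fun c => !PySem.Chars.isspace c) l) := by
  cases h : List.dropWhile (fun c => !PySem.Chars.isspace c) l with
  | nil => simp [PySem.Chars.rstrip]
  | cons a t =>
    have ha : PySem.Chars.isspace a = true := by
      have := List.head_dropWhile_not (fun c => !PySem.Chars.isspace c) (l := l) (by rw [h]; simp)
      simpa [h] using this
    rw [pvRstrip_cons]
    by_cases ht : PySem.Chars.rstrip t = [] <;> simp [ht, ha]

theorem pvDrop_rstrip (l : List Char) :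
    List.dropWhile (fun c => !PySem.Chars.isspace c) (PySem.Chars.rstrip l) =
      PySem.Chars.rstrip (List.dropWhile (fun c => !PySem.Chars.isspace c) l) := by
  rw [pvRstrip_decomp, List.dropWhile_append]
  have hw : List.dropWhile (fun c => !PySem.Chars.isspace c)
      (l.takeWhile (fun c => !PySem.Chars.isspace c)) = [] := by
    rw [List.dropWhile_eq_nil_iff]
    intro c hc
    simpa using List.mem_takeWhile_imp hc
  rw [hw]
  simp only [List.isEmpty_nil, if_pos]
  exact pvDrop_rstrip_drop l

def pvB (n : Nat) (cs : List Char) : List Char :=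
  let parts := PySem.Chars.split₀Max cs (n : Int)
  if n < parts.length then PySem.Chars.strip parts[n]! else []

theorem pvB_zero (cs : List Char) : pvB 0 cs = PySem.Chars.strip cs := by
  unfold pvB
  rw [show ((0 : Nat) : Int) = (0 : Int) from rfl, pvSplitMax_zero]
  by_cases h : PySem.Chars.lstrip cs = []
  · rw [if_pos h]
    simp
    exact (pvStrip_eq_nil_iff cs).2 h
  · rw [if_neg h]
    simp [PySem.Chars.strip, pvLstrip_idem]

theorem pvB_lstrip (n : Nat) (cs : List Char) : pvB n (PySem.Chars.lstrip cs) = pvB n cs := by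
  unfold pvB
  rw [pvSplitMax_lstrip]

theorem pvB_succ (n : Nat) (cs : List Char) (h : PySem.Chars.lstrip cs ≠ []) :
    pvB (n + 1) cs = pvB n ((PySem.Chars.lstrip cs).dropWhile (fun c => !PySem.Chars.isspace c)) := by
  unfold pvB
  rw [show ((n + 1 : Nat) : Int) = (n : Int) + 1 from by push_cast; ring, pvSplitMax_succ cs n h]
  simp only [List.length_cons]
  by_cases hlt : n < (PySem.Chars.split₀Max ((PySem.Chars.lstrip cs).dropWhile (fun c => !PySem.Chars.isspace c)) (n : Int)).length
  · rw [if_pos (by omega), if_pos hlt, List.getElem!_cons_succ]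
  · rw [if_neg (by omega), if_neg hlt]

theorem pvB_rstrip (n : Nat) (cs : List Char) : pvB n (PySem.Chars.rstrip cs) = pvB n cs := by
  induction n generalizing cs with
  | zero =>
    rw [pvB_zero, pvB_zero, PySem.Chars.strip, PySem.Chars.strip, pvComm, pvRstrip_idem, ← pvComm]
  | succ n ih =>
    by_cases h : PySem.Chars.lstrip cs = []
    · have hr : PySem.Chars.rstrip cs = [] :=
        (pvRstrip_eq_nil_iff cs).2 ((pvLstrip_eq_nil_iff cs).1 h)
      rw [hr]
      unfold pvB
      rw [pvSplitMax_nil _ _ h, pvSplitMax_nil [] _ (by simp [PySem.Chars.lstrip])]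
    · have hr : PySem.Chars.lstrip (PySem.Chars.rstrip cs) ≠ [] := by
        intro hc
        have h1 : PySem.Chars.rstrip (PySem.Chars.rstrip cs) = [] :=
          (pvRstrip_eq_nil_iff _).2 ((pvLstrip_eq_nil_iff _).1 hc)
        rw [pvRstrip_idem] at h1
        exact h ((pvLstrip_eq_nil_iff cs).2 ((pvRstrip_eq_nil_iff cs).1 h1))
      rw [pvB_succ n _ hr, pvB_succ n cs h, pvComm, pvDrop_rstrip, ih]

theorem pvMain (n : Nat) (cs : List Char) :
    PySem.Chars.strip (pvLoopA n cs) = pvB n cs := by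
  induction n generalizing cs with
  | zero => rw [pvB_zero]; rfl
  | succ n ih =>
    rw [pvLoopA]
    by_cases hr : PySem.Chars.strip cs = []
    · rw [if_pos hr]
      have h : PySem.Chars.lstrip cs = [] := (pvStrip_eq_nil_iff cs).1 hr
      unfold pvB
      rw [pvSplitMax_nil cs _ h, if_neg (by simp), hr]
      rfl
    · rw [if_neg hr]
      have hls : PySem.Chars.lstrip (PySem.Chars.strip cs) = PySem.Chars.strip cs :=
        pvLstrip_strip cs
      have h1 : PySem.Chars.split₀Max (PySem.Chars.strip cs) 1 =
          (PySem.Chars.strip cs).takeWhile (fun c => !PySem.Chars.isspace c) ::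
            (if PySem.Chars.lstrip ((PySem.Chars.strip cs).dropWhile (fun c => !PySem.Chars.isspace c)) = []
             then [] else [PySem.Chars.lstrip ((PySem.Chars.strip cs).dropWhile (fun c => !PySem.Chars.isspace c))]) := by
        rw [show (1 : Int) = ((0 : Nat) : Int) + 1 from rfl,
            pvSplitMax_succ _ 0 (by rw [hls]; exact hr), hls, Nat.cast_zero, pvSplitMax_zero]
      rw [h1]
      set s := (PySem.Chars.strip cs).dropWhile (fun c => !PySem.Chars.isspace c) with hs
      by_cases h2 : PySem.Chars.lstrip s = []
      · rw [if_pos h2]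
        simp only [List.length_cons, List.length_nil]
        rw [if_neg (by norm_num)]
        rw [ih]
        have : pvB n [] = pvB n (PySem.Chars.lstrip s) := by rw [h2]
        rw [this, pvB_lstrip]
        -- now reduce RHS
        rw [pvB_succ n cs ((fun hc => hr ((pvStrip_eq_nil_iff cs).2 hc)))]
        rw [hs, PySem.Chars.strip, pvDrop_rstrip, pvB_rstrip]
      · rw [if_neg h2]
        simp only [List.length_cons, List.length_nil]
        rw [if_pos (by norm_num)]
        rw [show ((PySem.Chars.strip cs).takeWhile (fun c => !PySem.Chars.isspace c) ::
              [PySem.Chars.lstrip s])[1]! = PySem.Chars.lstrip s from by simp]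
        rw [ih, pvB_lstrip]
        rw [pvB_succ n cs ((fun hc => hr ((pvStrip_eq_nil_iff cs).2 hc)))]
        rw [hs, PySem.Chars.strip, pvDrop_rstrip, pvB_rstrip]

theorem pvFinal (text : String) (st : Int) :
    strip_subcommand_py text st = strip_subcommand_py_alt text st := by
  unfold strip_subcommand_py strip_subcommand_py_alt
  rw [pvMain]
  simp only [PySem.Str.split₀Max, PySem.Str.strip]
  have hmax : max st 0 = (st.toNat : Int) := (Int.toNat_eq_max st).symm
  rw [hmax]
  simp only [Int.toNat_natCast, List.length_map, Nat.cast_lt]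
  unfold pvB
  by_cases hk : st.toNat < (PySem.Chars.split₀Max text.toList (st.toNat : Int)).length
  · rw [if_pos hk, if_pos hk]
    rw [getElem!_pos (List.map String.ofList (PySem.Chars.split₀Max text.toList (st.toNat : Int)))
          st.toNat (by simpa using hk),
        getElem!_pos (PySem.Chars.split₀Max text.toList (st.toNat : Int)) st.toNat hk,
        List.getElem_map]
    simp
  · rw [if_neg hk, if_neg hk]

-- ===== VERDICT (by name: the statement is the Claim_ definition above) =====
theorem strip_subcommand_py_spec : Claim_equal_strip_subcommand_py := by
  intro text st _
  unfold Spec_strip_subcommand_py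
  exact pvFinal text st
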